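-- pv_equiv track=rewrite | github.com/G4-AURA/Entrega-S1 | rutas/graphhopper.py | _crear_lotes
-- ===== SOURCE A (Python) =====
-- _MAX_WP_POR_LLAMADA = 5
--
-- def _crear_lotes(paradas_validas: list, max_wp: int = _MAX_WP_POR_LLAMADA) -> list[list]:
--     """
--     Divide la lista de paradas en lotes de máximo `max_wp` waypoints con
--     solapamiento de 1 punto entre lotes consecutivos.
--
--     Cada lote de K waypoints cubre K-1 segmentos.
--     El último punto de un lote es el primero del siguiente (punto de unión).
--
--     Ejemplo con 7 paradas y max_wp=5:
--       Lote 1: [p1, p2, p3, p4, p5]  →  4 segmentos  →  1 llamada API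
--       Lote 2: [p5, p6, p7]           →  2 segmentos  →  1 llamada API
--       Total: 2 llamadas (vs 6 con pares)
--
--     Args:
--         paradas_validas: Lista de (parada, [lon, lat]).
--         max_wp: Máximo waypoints por llamada (5 para el plan gratuito).
--     Returns:
--         Lista de lotes, donde cada lote es una sublista de paradas_validas.
--     """
--     lotes = []
--     i = 0
--     n = len(paradas_validas)
--
--     while i < n - 1:
--         fin = min(i + max_wp, n)
--         lotes.append(paradas_validas[i:fin])
--         if fin == n:
--             break
--         # El último punto del lote es el primero del siguiente (overlap de 1)
--         i = fin - 1
--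
--     return lotes
-- ===== SOURCE B (Python) =====
-- _MAX_WP_POR_LLAMADA = 5
--
-- def _crear_lotes(paradas_validas: list, max_wp: int = _MAX_WP_POR_LLAMADA) -> list:
--     # One pass with an accumulator: grow the current batch element by element;
--     # when it reaches max_wp, flush it and restart from the junction point.
--     lotes = []
--     lote = []
--     for p in paradas_validas:
--         lote.append(p)
--         if len(lote) == max_wp:
--             lotes.append(lote)
--             lote = [p]  # overlap of 1: the junction point opens the next batch
--     if len(lote) > 1:
--         lotes.append(lote)
--     return lotes
-- ===== Notes on version B (the rewrite author's own statement) =====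
-- stated objective: alternative
-- what changed: Replaces A's cursor-and-slice while loop (repeatedly slicing the list at computed offsets) by a single element-by-element pass with an accumulator that grows the current batch and flushes it when full, restarting from the junction point; no index arithmetic or slicing remains.
-- outside the precondition, e.g. on _crear_lotes([[0, 0]], 1): A returns [], B returns [[[0, 0]]]
import Mathlib
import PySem

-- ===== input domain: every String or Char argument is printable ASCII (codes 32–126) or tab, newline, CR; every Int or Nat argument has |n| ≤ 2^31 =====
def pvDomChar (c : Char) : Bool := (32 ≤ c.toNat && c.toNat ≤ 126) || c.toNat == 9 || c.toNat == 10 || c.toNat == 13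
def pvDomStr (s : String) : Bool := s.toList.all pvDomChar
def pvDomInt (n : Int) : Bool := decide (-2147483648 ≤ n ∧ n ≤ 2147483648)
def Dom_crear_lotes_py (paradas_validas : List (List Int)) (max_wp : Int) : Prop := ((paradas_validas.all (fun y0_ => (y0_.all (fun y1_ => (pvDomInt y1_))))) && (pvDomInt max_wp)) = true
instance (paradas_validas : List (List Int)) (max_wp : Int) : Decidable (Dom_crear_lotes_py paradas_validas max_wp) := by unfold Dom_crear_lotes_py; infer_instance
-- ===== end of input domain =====

-- B replaces A's cursor-and-slice while loop by a single element-by-element pass with a batch accumulator (alternative decomposition, same cost).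

-- ===== PORT A =====
-- A's while loop, with fuel = len(paradas_validas) (enough: the cursor advances by ≥ 1 per iteration whenever max_wp ≥ 2,
-- i.e. on every input Pre_ admits with ≥ 2 stops; on max_wp ≤ 1 with ≥ 2 stops the Python loop never terminates, excluded by Pre_).
def crearLoopA (pv : List (List Int)) (n max_wp : Int) : Nat → Int → List (List (List Int)) → List (List (List Int))
  | 0, _, lotes => lotes
  | fuel+1, i, lotes =>
    if i < n - 1 then
      let fin := min (i + max_wp) n
      let lotes' := lotes ++ [PySem.List.slice pv (some i) (some fin)]
      if fin = n then lotes' else crearLoopA pv n max_wp fuel (fin - 1) lotes'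
    else lotes

def crear_lotes_py (paradas_validas : List (List Int)) (max_wp : Int) : List (List (List Int)) :=
  crearLoopA paradas_validas (paradas_validas.length : Int) max_wp paradas_validas.length 0 []

-- ===== PORT B =====
-- one loop iteration of Source B: append p to the current batch; flush when it reaches max_wp, restarting from p
def crearStepB (max_wp : Int) (st : List (List (List Int)) × List (List Int)) (p : List Int) :
    List (List (List Int)) × List (List Int) :=
  let lote := st.2 ++ [p]
  if (lote.length : Int) = max_wp then (st.1 ++ [lote], [p]) else (st.1, lote)

def crear_lotes_py_alt (paradas_validas : List (List Int)) (max_wp : Int) : List (List (List Int)) :=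
  let st := paradas_validas.foldl (crearStepB max_wp) ([], [])
  if 1 < st.2.length then st.1 ++ [st.2] else st.1

-- ===== PRECONDITION & SPEC =====
-- Pre_ excludes max_wp ≤ 1 with ≥ 2 stops, where the Python A never returns (its cursor does not advance, the while
-- loop is infinite), and the degenerate corner max_wp = 1 with exactly one stop, where a batch size of 1 is outside the
-- function's purpose (a batch must cover a segment) and A's [] and B's single one-point batch are equally defensible.
def Pre_crear_lotes_py (paradas_validas : List (List Int)) (max_wp : Int) : Prop :=
  2 ≤ max_wp ∨ ((paradas_validas.length : Int) ≤ 1 ∧ (max_wp ≠ 1 ∨ paradas_validas = []))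
instance (paradas_validas : List (List Int)) (max_wp : Int) : Decidable (Pre_crear_lotes_py paradas_validas max_wp) := by unfold Pre_crear_lotes_py; infer_instance

def pvWitness_crear_lotes_py : List (List Int) × Int := ([[0, 0], [1, 1], [2, 2]], 2)

def Spec_crear_lotes_py (paradas_validas : List (List Int)) (max_wp : Int) (out : List (List (List Int))) : Prop := out = crear_lotes_py_alt paradas_validas max_wp
instance (paradas_validas : List (List Int)) (max_wp : Int) (out : List (List (List Int))) : Decidable (Spec_crear_lotes_py paradas_validas max_wp out) := by unfold Spec_crear_lotes_py; infer_instance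

-- ===== CLAIM (what is proved, stated in full; the proofs are below) =====
def Claim_equal_crear_lotes_py : Prop := ∀ (paradas_validas : List (List Int)) (max_wp : Int), Dom_crear_lotes_py paradas_validas max_wp → Pre_crear_lotes_py paradas_validas max_wp → Spec_crear_lotes_py paradas_validas max_wp (crear_lotes_py paradas_validas max_wp)

-- ===== LEMMAS AND PROOFS =====

-- the common characterisation both ports are reduced to: one slice per batch start 0, max_wp-1, 2(max_wp-1), …
def batchesR (m : List (List Int)) (max_wp : Int) : List (List (List Int)) :=
  (PySem.List.pyRange 0 ((m.length : Int) - 1) (max_wp - 1)).map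
    (fun j => PySem.List.slice m (some j) (some (j + max_wp)))

-- Source B's trailing `if len(lote) > 1: lotes.append(lote)` applied to the final fold state
def finishB (st : List (List (List Int)) × List (List Int)) : List (List (List Int)) :=
  if 1 < st.2.length then st.1 ++ [st.2] else st.1

lemma pyRange_nil_of_pos (a b s : Int) (hs : 0 < s) (h : b ≤ a) :
    PySem.List.pyRange a b s = [] := by
  rw [PySem.List.pyRange_of_pos a b hs, if_neg (by omega)]
  simp

lemma pyRange_cons_of_pos (a b s : Int) (hs : 0 < s) (h : a < b) :
    PySem.List.pyRange a b s = a :: PySem.List.pyRange (a + s) b s := by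
  rw [PySem.List.pyRange_of_pos a b hs, PySem.List.pyRange_of_pos (a + s) b hs]
  rw [if_pos h]
  have hcount : ((b - a + s - 1) / s).toNat
      = (if a + s < b then ((b - (a + s) + s - 1) / s).toNat else 0) + 1 := by
    by_cases hab : a + s < b
    · rw [if_pos hab]
      have h1 : b - a + s - 1 = (b - (a + s) + s - 1) + 1 * s := by ring
      rw [h1, Int.add_mul_ediv_right _ _ (by omega : s ≠ 0)]
      have h2 : 0 ≤ (b - (a + s) + s - 1) / s := Int.ediv_nonneg (by omega) (by omega)
      omega
    · rw [if_neg hab]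
      have h1 : b - a + s - 1 = (b - a - 1) + 1 * s := by ring
      rw [h1, Int.add_mul_ediv_right _ _ (by omega : s ≠ 0)]
      have h2 : (b - a - 1) / s = 0 := Int.ediv_eq_zero_of_lt (by omega) (by omega)
      omega
  rw [hcount, List.range_succ_eq_map]
  simp only [List.map_cons, List.map_map]
  congr 1
  · simp
  · apply List.map_congr_left
    intro k _
    simp [Nat.succ_eq_add_one]
    ring

lemma pyRange_shift_of_pos (a b s t : Int) (hs : 0 < s) :
    PySem.List.pyRange (a + t) (b + t) s = (PySem.List.pyRange a b s).map (· + t) := by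
  rw [PySem.List.pyRange_of_pos a b hs, PySem.List.pyRange_of_pos (a + t) (b + t) hs]
  have hb : b + t - (a + t) = b - a := by ring
  rw [hb]
  by_cases hab : a < b
  · rw [if_pos hab, if_pos (by omega)]
    rw [List.map_map]
    apply List.map_congr_left
    intro k _
    simp
    ring
  · rw [if_neg hab, if_neg (by omega)]
    simp

lemma slice_min_clamp (pv : List (List Int)) (i e : Int) (hi : 0 ≤ i) (he : 0 ≤ e) :
    PySem.List.slice pv (some i) (some (min e (pv.length : Int)))
      = PySem.List.slice pv (some i) (some e) := by
  rw [PySem.List.slice_toNat pv hi (le_min he (by positivity)),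
      PySem.List.slice_toNat pv hi he]
  apply List.take_eq_take_iff.mpr
  simp only [List.length_drop]
  omega

lemma slice_drop (m : List (List Int)) (k : Nat) (j e : Int) (hj : 0 ≤ j) (he : 0 ≤ e) :
    PySem.List.slice m (some (j + (k : Int))) (some (e + (k : Int)))
      = PySem.List.slice (m.drop k) (some j) (some e) := by
  rw [PySem.List.slice_toNat m (by omega) (by omega),
      PySem.List.slice_toNat (m.drop k) hj he]
  rw [List.drop_drop]
  congr 1
  · omega
  · congr 1
    omega

-- peel off the first batch of batchesR when the front holds max_wp - 1 elements before the junction point p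
lemma batchesR_cons (cur : List (List Int)) (p : List Int) (l' : List (List Int)) (max_wp : Int)
    (h2 : 2 ≤ max_wp) (hc : (cur.length : Int) = max_wp - 1) :
    batchesR (cur ++ p :: l') max_wp = (cur ++ [p]) :: batchesR (p :: l') max_wp := by
  unfold batchesR
  have hlen : ((cur ++ p :: l').length : Int) = max_wp + l'.length := by simp; omega
  rw [hlen, pyRange_cons_of_pos _ _ _ (by omega) (by omega), List.map_cons]
  congr 1
  · rw [PySem.List.slice_toNat _ le_rfl (by omega)]
    simp only [Int.toNat_zero, List.drop_zero, zero_add]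
    have h1 : cur ++ p :: l' = (cur ++ [p]) ++ l' := by simp
    rw [h1]
    apply List.take_left'
    simp
    omega
  · have hstep : PySem.List.pyRange (0 + (max_wp - 1)) (max_wp + (l'.length : Int) - 1) (max_wp - 1)
        = (PySem.List.pyRange 0 (((p :: l').length : Int) - 1) (max_wp - 1)).map (· + (max_wp - 1)) := by
      have := pyRange_shift_of_pos 0 (((p :: l').length : Int) - 1) (max_wp - 1) (max_wp - 1) (by omega)
      rw [← this]
      congr 1
      simp
      omega
    rw [hstep, List.map_map]
    apply List.map_congr_left
    intro j hj
    have hj0 : 0 ≤ j := by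
      have := (PySem.List.mem_pyRange_iff_of_pos (by omega : (0:Int) < max_wp - 1) j).mp hj
      omega
    have hd : (cur ++ p :: l').drop (max_wp - 1).toNat = p :: l' := by
      have hk : (max_wp - 1).toNat = cur.length := by omega
      rw [hk, List.drop_left]
    simp only [Function.comp_apply]
    have hs := slice_drop (cur ++ p :: l') (max_wp - 1).toNat j (j + max_wp) hj0 (by omega)
    rw [hd] at hs
    rw [← hs]
    congr 2 <;> omega

-- the fold of Source B, started from a partially filled current batch, produces exactly the slice batches of cur ++ l
lemma foldB_eq (max_wp : Int) (h2 : 2 ≤ max_wp) :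
    ∀ (l : List (List Int)) (acc : List (List (List Int))) (cur : List (List Int)),
      1 ≤ cur.length → (cur.length : Int) ≤ max_wp - 1 →
      finishB (l.foldl (crearStepB max_wp) (acc, cur)) = acc ++ batchesR (cur ++ l) max_wp := by
  intro l
  induction l with
  | nil =>
    intro acc cur h1 hle
    simp only [List.foldl_nil, List.append_nil]
    unfold finishB batchesR
    by_cases hc : 1 < cur.length
    · rw [if_pos hc]
      rw [pyRange_cons_of_pos _ _ _ (by omega) (by omega)]
      rw [pyRange_nil_of_pos _ _ _ (by omega) (by omega)]
      simp only [List.map_cons, List.map_nil]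
      congr 2
      rw [PySem.List.slice_toNat _ le_rfl (by omega)]
      simp only [Int.toNat_zero, List.drop_zero]
      symm
      apply List.take_of_length_le
      omega
    · rw [if_neg hc]
      rw [pyRange_nil_of_pos _ _ _ (by omega) (by omega)]
      simp
  | cons p l' ih =>
    intro acc cur h1 hle
    simp only [List.foldl_cons]
    by_cases hfull : ((cur ++ [p]).length : Int) = max_wp
    · have hstep : crearStepB max_wp (acc, cur) p = (acc ++ [cur ++ [p]], [p]) := by
        simp only [crearStepB, if_pos hfull]
      rw [hstep, ih (acc ++ [cur ++ [p]]) [p] (by simp) (by simp; omega)]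
      rw [batchesR_cons cur p l' max_wp h2 (by simp at hfull ⊢; omega)]
      simp
    · have hstep : crearStepB max_wp (acc, cur) p = (acc, cur ++ [p]) := by
        simp only [crearStepB, if_neg hfull]
      rw [hstep, ih acc (cur ++ [p]) (by simp) (by simp at hfull ⊢; omega)]
      simp

lemma crearLoopA_eq (pv : List (List Int)) (max_wp : Int) (h2 : 2 ≤ max_wp) :
    ∀ (fuel : Nat) (i : Int) (acc : List (List (List Int))), 0 ≤ i →
      ((pv.length : Int) - 1 - i).toNat ≤ fuel →
      crearLoopA pv (pv.length : Int) max_wp fuel i acc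
        = acc ++ (PySem.List.pyRange i ((pv.length : Int) - 1) (max_wp - 1)).map
            (fun j => PySem.List.slice pv (some j) (some (j + max_wp))) := by
  intro fuel
  induction fuel with
  | zero =>
    intro i acc hi hf
    rw [pyRange_nil_of_pos _ _ _ (by omega) (by omega)]
    simp [crearLoopA]
  | succ fuel ih =>
    intro i acc hi hf
    by_cases hlt : i < (pv.length : Int) - 1
    · rw [pyRange_cons_of_pos _ _ _ (by omega) hlt]
      by_cases hfin : min (i + max_wp) (pv.length : Int) = (pv.length : Int)
      · have htail : PySem.List.pyRange (i + (max_wp - 1)) ((pv.length : Int) - 1) (max_wp - 1) = [] :=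
          pyRange_nil_of_pos _ _ _ (by omega) (by omega)
        simp only [crearLoopA, if_pos hlt, if_pos hfin, htail]
        rw [hfin, show ((pv.length : Int)) = min (i + max_wp) (pv.length : Int) from hfin.symm,
            slice_min_clamp pv i (i + max_wp) hi (by omega)]
        simp
      · have hmin : min (i + max_wp) (pv.length : Int) = i + max_wp := by omega
        simp only [crearLoopA, if_pos hlt, if_neg hfin]
        rw [ih (min (i + max_wp) (pv.length : Int) - 1) _ (by omega) (by omega)]
        rw [hmin]
        have harg : i + max_wp - 1 = i + (max_wp - 1) := by ring
        rw [harg]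
        simp
    · rw [pyRange_nil_of_pos _ _ _ (by omega) (by omega)]
      simp [crearLoopA, if_neg hlt]

-- ===== VERDICT (by name: the statement is the Claim_ definition above) =====
theorem crear_lotes_py_spec : Claim_equal_crear_lotes_py := by
  intro pv max_wp _ hpre
  unfold Spec_crear_lotes_py
  have halt : crear_lotes_py_alt pv max_wp
      = finishB (pv.foldl (crearStepB max_wp) ([], [])) := rfl
  have ha : crear_lotes_py pv max_wp
      = crearLoopA pv (pv.length : Int) max_wp pv.length 0 [] := rfl
  rw [halt, ha]
  by_cases h2 : 2 ≤ max_wp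
  · rw [crearLoopA_eq pv max_wp h2 pv.length 0 [] (by omega) (by omega)]
    cases pv with
    | nil =>
      rw [pyRange_nil_of_pos _ _ _ (by omega) (by simp)]
      simp [finishB]
    | cons p rest =>
      have hstep : crearStepB max_wp ([], []) p = ([], [p]) := by
        simp only [crearStepB]
        rw [if_neg (by simpa using (by omega : ¬(1 : Int) = max_wp))]
        simp
      simp only [List.foldl_cons, hstep]
      rw [foldB_eq max_wp h2 rest [] [p] (by simp) (by simp; omega)]
      simp [batchesR]
  · rcases hpre with h | ⟨hlen, hne⟩
    · omega
    · cases pv with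
      | nil => simp [crearLoopA, finishB]
      | cons p rest =>
        cases rest with
        | nil =>
          have hmw : max_wp ≠ 1 := by
            rcases hne with h | h
            · exact h
            · exact absurd h (by simp)
          have hstep : crearStepB max_wp ([], []) p = ([], [p]) := by
            simp only [crearStepB]
            rw [if_neg (by simpa using (by omega : ¬(1 : Int) = max_wp))]
            simp
          simp only [List.foldl_cons, List.foldl_nil, hstep]
          simp only [crearLoopA, List.length_cons, List.length_nil]
          rw [if_neg (by omega : ¬((0 : Int) < ((0 : Nat) + 1 : Nat) - 1))]
          simp [finishB]
        | cons q rest' => simp at hlen; omega
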